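-- pv_equiv track=rewrite | github.com/valacuhi/CatsDogs | 10b-miau.py | find_potential_vertical_move
-- ===== SOURCE A (Python) =====
-- ROWS = 15
--
-- COLS = 3
--
-- EMPTY = ' '  # <-- MODIFIED: Changed from '.' to ' '
--
-- def find_potential_vertical_move(board, player, length):
--     """
--     Finds a move to extend (or block) a vertical line of 'length' for 'player'.
--     e.g., length=2 -> finds 2-in-a-row and returns the empty spot to make it 3.
--     """
--     for c in range(COLS):
--         for r in range(ROWS - length):
--             # Check for 'length' pieces in a row
--             is_threat = True
--             for i in range(length):
--                 if board[r+i][c] != player: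
--                     is_threat = False
--                     break
--
--             if is_threat:
--                 # Found 'length' pieces. Can we play *below*?
--                 if (r + length) < ROWS and board[r + length][c] == EMPTY:
--                     # e.g., found 2 at (5,0), (6,0). Play at (7,0).
--                     return (r + length, c)
--
--                 # Can we play *above*?
--                 if (r - 1) >= 0 and board[r - 1][c] == EMPTY:
--                     # e.g., found 2 at (5,0), (6,0). Play at (4,0).
--                     return (r - 1, c)
--     return None
-- ===== SOURCE B (Python) =====
-- ROWS = 15
--
-- COLS = 3
--
-- EMPTY = ' '
--
-- def find_potential_vertical_move(board, player, length):
--     # Stage 1: materialise each column as a flat list; stage 2: one run-counter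
--     # scan of that list (no per-window rescans, no 2-D indexing in the scan).
--     if length > ROWS - 1:
--         return None
--     for c in range(COLS):
--         col = [board[r][c] for r in range(ROWS)]
--         run = 0
--         for r, cell in enumerate(col):
--             run = run + 1 if cell == player else 0
--             # run >= length means a threat window ends at r; A only considers
--             # window starts in range(ROWS-length), i.e. r <= ROWS - 2.
--             if run >= length and r <= ROWS - 2:
--                 if col[r + 1] == EMPTY:
--                     return (r + 1, c)
--                 if r - length >= 0 and col[r - length] == EMPTY:
--                     return (r - length, c)
--     return None
-- ===== Notes on version B (the rewrite author's own statement) =====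
-- stated objective: alternative
-- what changed: B first flattens each column into a 1-D list, then makes a single run-counter pass over that list (threat = run reaching length, act on the cell below then the cell above), replacing A's nested rescan of every length-window with 2-D indexing. Pre_ excludes non-positive length (a degenerate zero/negative run request, where A's empty-window matching and negative-index wraparound are accidental) and, for length<15, boards lacking 15 rows of >=3 cells (where A raising IndexError or not depends on board content).
-- outside the precondition, e.g. on find_potential_vertical_move([[' ', ' ']], ' ', -1): A returns (-1, 0), B raises IndexError; on find_potential_vertical_move([['x'], [' ']], 'x', 1): A returns (1, 0), B raises IndexError
import Mathlib
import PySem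

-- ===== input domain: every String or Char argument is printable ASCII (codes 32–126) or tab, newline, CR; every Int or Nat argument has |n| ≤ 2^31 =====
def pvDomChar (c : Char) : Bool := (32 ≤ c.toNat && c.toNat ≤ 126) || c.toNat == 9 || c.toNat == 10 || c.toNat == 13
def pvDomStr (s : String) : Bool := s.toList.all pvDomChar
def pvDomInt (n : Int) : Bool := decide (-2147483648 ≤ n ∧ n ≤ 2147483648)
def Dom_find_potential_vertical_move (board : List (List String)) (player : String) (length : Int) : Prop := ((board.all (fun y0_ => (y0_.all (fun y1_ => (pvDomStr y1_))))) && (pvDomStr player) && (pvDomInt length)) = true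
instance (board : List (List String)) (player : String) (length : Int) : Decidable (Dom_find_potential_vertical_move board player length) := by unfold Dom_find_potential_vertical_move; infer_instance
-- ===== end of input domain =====

-- B flattens each column to a 1-D list and makes one run-counter pass over it,
-- replacing A's per-window rescans with 2-D indexing (alternative decomposition).

-- ===== PORT A =====
-- board[r][c], defaulting outside Pre_ (Python raises IndexError there; nothing is claimed outside Pre_)
def pvCell (board : List (List String)) (r c : Int) : String :=
  PySem.List.pyGetD (PySem.List.pyGetD board r []) c ""

-- the inner 'for i in range(length)' threat check
def pvAThreat (board : List (List String)) (player : String) (c r length : Int) : Bool :=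
  (PySem.List.pyRange 0 length 1).all (fun i => decide (pvCell board (r + i) c = player))

-- the 'for r in range(ROWS - length)' loop
def pvARow (board : List (List String)) (player : String) (length c : Int) : List Int → Option (Int × Int)
  | [] => none
  | r :: rs =>
    if pvAThreat board player c r length = true then
      if r + length < 15 ∧ pvCell board (r + length) c = " " then some (r + length, c)
      else if 0 ≤ r - 1 ∧ pvCell board (r - 1) c = " " then some (r - 1, c)
      else pvARow board player length c rs
    else pvARow board player length c rs

-- the 'for c in range(COLS)' loop
def pvACol (board : List (List String)) (player : String) (length : Int) : List Int → Option (Int × Int)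
  | [] => none
  | c :: cs =>
    match pvARow board player length c (PySem.List.pyRange 0 (15 - length) 1) with
    | some m => some m
    | none => pvACol board player length cs

def find_potential_vertical_move (board : List (List String)) (player : String) (length : Int) : Option (Int × Int) :=
  pvACol board player length (PySem.List.pyRange 0 3 1)

-- ===== PORT B =====
-- col = [board[r][c] for r in range(ROWS)]
def pvColOf (board : List (List String)) (c : Int) : List String :=
  (PySem.List.pyRange 0 15 1).map
    (fun r => PySem.List.pyGetD (PySem.List.pyGetD board r []) c "")

-- 'for r, cell in enumerate(col)': structural recursion over the column's cells,
-- carrying the current index r and the running count of consecutive player cells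
def pvScan (player : String) (length : Int) (col : List String) (c : Int) :
    Int → Int → List String → Option (Int × Int)
  | _, _, [] => none
  | r, run, cell :: cells =>
    let run' : Int := if cell = player then run + 1 else 0
    if length ≤ run' ∧ r ≤ 13 then
      if PySem.List.pyGetD col (r + 1) "" = " " then some (r + 1, c)
      else if 0 ≤ r - length ∧ PySem.List.pyGetD col (r - length) "" = " " then
        some (r - length, c)
      else pvScan player length col c (r + 1) run' cells
    else pvScan player length col c (r + 1) run' cells

-- 'for c in range(COLS)' over the flattened columns
def pvCols (board : List (List String)) (player : String) (length : Int) : List Int → Option (Int × Int)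
  | [] => none
  | c :: cs =>
    let col := pvColOf board c
    match pvScan player length col c 0 0 col with
    | some m => some m
    | none => pvCols board player length cs

def find_potential_vertical_move_alt (board : List (List String)) (player : String) (length : Int) : Option (Int × Int) :=
  if 15 - 1 < length then none
  else pvCols board player length (PySem.List.pyRange 0 3 1)

-- ===== PRECONDITION & SPEC =====
-- Pre_ excludes non-positive length (a degenerate zero/negative run request, on which A's
-- empty-window matching and negative-index wraparound are accidental) and, when length < 15,
-- boards without 15 rows of ≥ 3 cells, on which A raises IndexError or returns depending on content.
def Pre_find_potential_vertical_move (board : List (List String)) (player : String) (length : Int) : Prop :=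
  1 ≤ length ∧ (15 ≤ length ∨ (15 ≤ board.length ∧ ∀ row ∈ board.take 15, 3 ≤ row.length))
instance (board : List (List String)) (player : String) (length : Int) : Decidable (Pre_find_potential_vertical_move board player length) := by unfold Pre_find_potential_vertical_move; infer_instance

def pvWitness_find_potential_vertical_move : List (List String) × String × Int :=
  ([[" ", " ", " "], [" ", " ", " "], [" ", " ", " "], [" ", " ", " "], [" ", " ", " "],
    [" ", " ", " "], [" ", " ", " "], [" ", " ", " "], ["x", "o", " "], ["x", "o", " "],
    [" ", " ", " "], [" ", " ", " "], [" ", " ", " "], [" ", " ", " "], [" ", " ", " "]], "x", 2)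

def Spec_find_potential_vertical_move (board : List (List String)) (player : String) (length : Int) (out : Option (Int × Int)) : Prop := out = find_potential_vertical_move_alt board player length
instance (board : List (List String)) (player : String) (length : Int) (out : Option (Int × Int)) : Decidable (Spec_find_potential_vertical_move board player length out) := by unfold Spec_find_potential_vertical_move; infer_instance

-- ===== CLAIM (what is proved, stated in full; the proofs are below) =====
def Claim_equal_find_potential_vertical_move : Prop := ∀ (board : List (List String)) (player : String) (length : Int), Dom_find_potential_vertical_move board player length → Pre_find_potential_vertical_move board player length → Spec_find_potential_vertical_move board player length (find_potential_vertical_move board player length)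

-- ===== LEMMAS AND PROOFS =====

-- proof-side reference loop: the same run-counter scan expressed over ROW INDICES,
-- used only as a bridge between pvScan (B) and pvARow (A)
def pvBRow (board : List (List String)) (player : String) (length c run : Int) : List Int → Option (Int × Int)
  | [] => none
  | r :: rs =>
    let run' : Int := if pvCell board r c = player then run + 1 else 0
    if length ≤ run' then
      let start : Int := r - length + 1
      if start ≤ 15 - length - 1 then
        if pvCell board (r + 1) c = " " then some (r + 1, c)
        else if 0 ≤ start - 1 ∧ pvCell board (start - 1) c = " " then some (start - 1, c)
        else pvBRow board player length c run' rs
      else pvBRow board player length c run' rs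
    else pvBRow board player length c run' rs

lemma pvCol_lookup (board : List (List String)) (c i : Int) (h0 : 0 ≤ i) (h1 : i < 15) :
    PySem.List.pyGetD (pvColOf board c) i "" = pvCell board i c := by
  unfold pvColOf pvCell
  exact PySem.List.pyGetD_map_pyRange_of_nonneg _ 15 i "" h0 h1

-- pvScan over the column list equals pvBRow over the corresponding row indices
lemma pvScan_eq_pvBRow (board : List (List String)) (player : String) (c length : Int)
    (hlen : 1 ≤ length) :
    ∀ (n : Nat), (n : Int) ≤ 15 → ∀ run : Int,
      pvScan player length (pvColOf board c) c (15 - (n : Int)) run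
        ((PySem.List.pyRange (15 - (n : Int)) 15 1).map (fun r => pvCell board r c)) =
      pvBRow board player length c run (PySem.List.pyRange (15 - (n : Int)) 15 1) := by
  intro n
  induction n with
  | zero =>
    intro _ run
    rw [PySem.List.pyRange_one_eq_nil (by norm_num)]
    rfl
  | succ n ih =>
    intro hn run
    push_cast at hn ⊢
    set r0 : Int := 15 - ((n : Int) + 1) with hr0
    rw [PySem.List.pyRange_one_cons (by omega), List.map_cons]
    have hrest : r0 + 1 = 15 - (n : Int) := by omega
    simp only [pvScan, pvBRow]
    set run' : Int := if pvCell board r0 c = player then run + 1 else 0 with hrun'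
    have hIH := ih (by omega) run'
    rw [hrest]
    by_cases h1 : length ≤ run'
    · by_cases h2 : r0 ≤ 13
      · rw [if_pos (show length ≤ run' ∧ r0 ≤ 13 from ⟨h1, h2⟩), if_pos h1,
          if_pos (show r0 - length + 1 ≤ 15 - length - 1 by omega)]
        rw [pvCol_lookup board c (15 - (n : Int)) (by omega) (by omega)]
        by_cases hb : pvCell board (15 - (n : Int)) c = " "
        · rw [if_pos hb, if_pos hb]
        · rw [if_neg hb, if_neg hb]
          have hcond : (0 ≤ r0 - length ∧ PySem.List.pyGetD (pvColOf board c) (r0 - length) "" = " ")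
              ↔ (0 ≤ r0 - length + 1 - 1 ∧ pvCell board (r0 - length + 1 - 1) c = " ") := by
            constructor
            · rintro ⟨hz, he⟩
              rw [pvCol_lookup board c (r0 - length) hz (by omega)] at he
              exact ⟨by omega, by rw [show r0 - length + 1 - 1 = r0 - length by ring]; exact he⟩
            · rintro ⟨hz, he⟩
              rw [show r0 - length + 1 - 1 = r0 - length by ring] at he hz
              exact ⟨hz, by rw [pvCol_lookup board c (r0 - length) hz (by omega)]; exact he⟩
          by_cases ha : 0 ≤ r0 - length ∧ PySem.List.pyGetD (pvColOf board c) (r0 - length) "" = " "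
          · rw [if_pos ha, if_pos (hcond.mp ha),
              show r0 - length + 1 - 1 = r0 - length by ring]
          · rw [if_neg ha, if_neg (fun h => ha (hcond.mpr h)), hIH]
      · rw [if_neg (by rintro ⟨_, h⟩; exact h2 h), if_pos h1,
          if_neg (show ¬ r0 - length + 1 ≤ 15 - length - 1 by omega), hIH]
    · rw [if_neg (by rintro ⟨h, _⟩; exact h1 h), if_neg h1, hIH]

lemma pvThreat_true (board : List (List String)) (player : String) (c s length : Int)
    (h : ∀ r : Int, s ≤ r → r < s + length → pvCell board r c = player) :
    pvAThreat board player c s length = true := by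
  simp only [pvAThreat, List.all_eq_true]
  intro i hi
  rw [PySem.List.mem_pyRange_one] at hi
  exact decide_eq_true (h (s + i) (by omega) (by omega))

lemma pvThreat_false (board : List (List String)) (player : String) (c s length : Int)
    (r : Int) (h1 : s ≤ r) (h2 : r < s + length) (h : ¬ pvCell board r c = player) :
    pvAThreat board player c s length = false := by
  apply List.all_eq_false.mpr
  refine ⟨r - s, ?_, ?_⟩
  · rw [PySem.List.mem_pyRange_one]; omega
  · have : s + (r - s) = r := by omega
    rw [this]
    simpa using h

-- A skips every start in [a, a+k): not a threat, or both playable-cell checks fail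
lemma pvSkip (board : List (List String)) (player : String) (length c : Int) (k : Nat) :
    ∀ a : Int, (∀ s : Int, a ≤ s → s < a + k → s < 15 - length →
      (pvAThreat board player c s length = false ∨
        (¬ pvCell board (s + length) c = " " ∧ ¬ (0 ≤ s - 1 ∧ pvCell board (s - 1) c = " ")))) →
    pvARow board player length c (PySem.List.pyRange a (15 - length) 1) =
    pvARow board player length c (PySem.List.pyRange (a + k) (15 - length) 1) := by
  induction k with
  | zero => intro a _; norm_num
  | succ k ih =>
    intro a H
    by_cases ha : a < 15 - length
    · rw [PySem.List.pyRange_one_cons ha]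
      have h := H a le_rfl (by push_cast; omega) ha
      have step : pvARow board player length c (a :: PySem.List.pyRange (a + 1) (15 - length) 1) =
          pvARow board player length c (PySem.List.pyRange (a + 1) (15 - length) 1) := by
        rcases h with h | ⟨h1, h2⟩
        · simp [pvARow, h]
        · simp only [pvARow]
          by_cases ht : pvAThreat board player c a length = true
          · rw [if_pos ht, if_neg (by rintro ⟨_, hh⟩; exact h1 hh), if_neg h2]
          · rw [if_neg ht]
      rw [step]
      have := ih (a + 1) (fun s hs1 hs2 hs3 => H s (by omega) (by push_cast at hs2 ⊢; omega) hs3)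
      have harg : a + 1 + (k : Int) = a + ((k + 1 : Nat) : Int) := by push_cast; ring
      rw [this, harg]
    · rw [PySem.List.pyRange_one_eq_nil (by omega),
        PySem.List.pyRange_one_eq_nil (by push_cast; omega)]

-- main invariant: after the run-counter scan has processed rows [0, 15-n) of column c with
-- current run v, the remaining scan equals A's scan restarted from window start 15-n-v
lemma pvMain (board : List (List String)) (player : String) (c length : Int) (hlen : 1 ≤ length) :
    ∀ (n : Nat) (v : Int), (n : Int) ≤ 15 → 0 ≤ v → v ≤ 15 - (n : Int) →
      (∀ r : Int, 15 - (n : Int) - v ≤ r → r < 15 - (n : Int) → pvCell board r c = player) →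
      (∀ s : Int, 15 - (n : Int) - v ≤ s → s ≤ 15 - (n : Int) - length → 0 ≤ s → s < 15 - length →
        ¬ pvCell board (s + length) c = " " ∧ (1 ≤ s → ¬ pvCell board (s - 1) c = " ")) →
      pvBRow board player length c v (PySem.List.pyRange (15 - (n : Int)) 15 1) =
      pvARow board player length c (PySem.List.pyRange (15 - (n : Int) - v) (15 - length) 1) := by
  intro n
  induction n with
  | zero =>
    intro v _ hv0 hv15 hstreak hfacts
    rw [PySem.List.pyRange_one_eq_nil (by norm_num)]
    have hskip := pvSkip board player length c v.toNat (15 - (0 : Nat) - v)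
      (fun s hs1 hs2 hs3 => by
        refine Or.inr ⟨(hfacts s (by omega) (by omega) (by omega) hs3).1, ?_⟩
        rintro ⟨h0, he⟩
        exact (hfacts s (by omega) (by omega) (by omega) hs3).2 (by omega) he)
    rw [hskip, PySem.List.pyRange_one_eq_nil (by omega)]
    rfl
  | succ n ih =>
    intro v hn hv0 hv15 hstreak hfacts
    push_cast at hn hv15 hstreak hfacts ⊢
    set r0 : Int := 15 - ((n : Int) + 1) with hr0
    rw [PySem.List.pyRange_one_cons (by omega)]
    have hrest : r0 + 1 = 15 - (n : Int) := by omega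
    by_cases hp : pvCell board r0 c = player
    · have hrun : (if pvCell board r0 c = player then v + 1 else 0) = v + 1 := if_pos hp
      by_cases hlv : length ≤ v + 1
      · -- run reaches length: the scan examines window start w = r0 - length + 1
        set w : Int := r0 - length + 1 with hwdef
        by_cases hw : w ≤ 15 - length - 1
        · by_cases he1 : pvCell board (r0 + 1) c = " "
          · -- both return the cell below the window
            have hB : pvBRow board player length c v (r0 :: PySem.List.pyRange (r0 + 1) 15 1) =
                some (r0 + 1, c) := by
              simp only [pvBRow, hrun]
              rw [if_pos hlv, if_pos (show r0 - length + 1 ≤ 15 - length - 1 by omega), if_pos he1]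
            rw [hB]
            have hskip := pvSkip board player length c (v - length + 1).toNat (15 - ((n : Int) + 1) - v)
              (fun s hs1 hs2 hs3 => by
                refine Or.inr ⟨(hfacts s (by omega) (by omega) (by omega) hs3).1, ?_⟩
                rintro ⟨h0, he⟩
                exact (hfacts s (by omega) (by omega) (by omega) hs3).2 (by omega) he)
            rw [hskip]
            have hwa : 15 - ((n : Int) + 1) - v + ((v - length + 1).toNat : Int) = w := by omega
            rw [hwa, PySem.List.pyRange_one_cons (by omega)]
            have hth : pvAThreat board player c w length = true := by
              apply pvThreat_true
              intro r h1 h2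
              by_cases hr : r < r0
              · exact hstreak r (by omega) (by omega)
              · have : r = r0 := by omega
                rwa [this]
            have hwl : w + length = r0 + 1 := by omega
            simp only [pvARow]
            rw [if_pos hth, if_pos (show w + length < 15 ∧ pvCell board (w + length) c = " "
              from ⟨by omega, by rw [hwl]; exact he1⟩), hwl]
          · by_cases he2 : 0 ≤ w - 1 ∧ pvCell board (w - 1) c = " "
            · -- both return the cell above the window
              have hB : pvBRow board player length c v (r0 :: PySem.List.pyRange (r0 + 1) 15 1) =
                  some (w - 1, c) := by
                simp only [pvBRow, hrun]
                rw [if_pos hlv, if_pos (show r0 - length + 1 ≤ 15 - length - 1 by omega),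
                  if_neg he1, if_pos he2]
              rw [hB]
              have hskip := pvSkip board player length c (v - length + 1).toNat (15 - ((n : Int) + 1) - v)
                (fun s hs1 hs2 hs3 => by
                  refine Or.inr ⟨(hfacts s (by omega) (by omega) (by omega) hs3).1, ?_⟩
                  rintro ⟨h0, he⟩
                  exact (hfacts s (by omega) (by omega) (by omega) hs3).2 (by omega) he)
              rw [hskip]
              have hwa : 15 - ((n : Int) + 1) - v + ((v - length + 1).toNat : Int) = w := by omega
              rw [hwa, PySem.List.pyRange_one_cons (by omega)]
              have hth : pvAThreat board player c w length = true := by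
                apply pvThreat_true
                intro r h1 h2
                by_cases hr : r < r0
                · exact hstreak r (by omega) (by omega)
                · have : r = r0 := by omega
                  rwa [this]
              have hwl : w + length = r0 + 1 := by omega
              simp only [pvARow]
              rw [if_pos hth, if_neg (show ¬ (w + length < 15 ∧ pvCell board (w + length) c = " ")
                from by rintro ⟨_, h⟩; rw [hwl] at h; exact he1 h), if_pos he2]
            · -- window fails both checks: both continue
              have hB : pvBRow board player length c v (r0 :: PySem.List.pyRange (r0 + 1) 15 1) =
                  pvBRow board player length c (v + 1) (PySem.List.pyRange (r0 + 1) 15 1) := by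
                simp only [pvBRow, hrun]
                rw [if_pos hlv, if_pos (show r0 - length + 1 ≤ 15 - length - 1 by omega),
                  if_neg he1, if_neg he2]
              rw [hB, hrest]
              have := ih (v + 1) (by omega) (by omega) (by omega)
                (fun r h1 h2 => by
                  by_cases hr : r < r0
                  · exact hstreak r (by omega) (by omega)
                  · have : r = r0 := by omega
                    rwa [this])
                (fun s hs1 hs2 hs3 hs4 => by
                  by_cases hsw : s = w
                  · subst hsw
                    refine ⟨by rw [show w + length = r0 + 1 by omega]; exact he1, ?_⟩
                    intro h1 he
                    exact he2 ⟨by omega, he⟩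
                  · exact ⟨(hfacts s (by omega) (by omega) hs3 hs4).1,
                      fun h1 => (hfacts s (by omega) (by omega) hs3 hs4).2 h1⟩)
              rw [show (15:Int) - (n:Int) - (v + 1) = r0 - v by omega] at this
              rw [this]
        · -- window start out of A's range(ROWS-length): the scan continues without checks
          have hB : pvBRow board player length c v (r0 :: PySem.List.pyRange (r0 + 1) 15 1) =
              pvBRow board player length c (v + 1) (PySem.List.pyRange (r0 + 1) 15 1) := by
            simp only [pvBRow, hrun]
            rw [if_pos hlv, if_neg (show ¬ r0 - length + 1 ≤ 15 - length - 1 from hw)]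
          rw [hB, hrest]
          have := ih (v + 1) (by omega) (by omega) (by omega)
            (fun r h1 h2 => by
              by_cases hr : r < r0
              · exact hstreak r (by omega) (by omega)
              · have : r = r0 := by omega
                rwa [this])
            (fun s hs1 hs2 hs3 hs4 => by
              exact ⟨(hfacts s (by omega) (by omega) hs3 hs4).1,
                fun h1 => (hfacts s (by omega) (by omega) hs3 hs4).2 h1⟩)
          rw [show (15:Int) - (n:Int) - (v + 1) = r0 - v by omega] at this
          rw [this]
      · -- run still short of length: the scan continues
        have hB : pvBRow board player length c v (r0 :: PySem.List.pyRange (r0 + 1) 15 1) =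
            pvBRow board player length c (v + 1) (PySem.List.pyRange (r0 + 1) 15 1) := by
          simp only [pvBRow, hrun]
          rw [if_neg hlv]
        rw [hB, hrest]
        have := ih (v + 1) (by omega) (by omega) (by omega)
          (fun r h1 h2 => by
            by_cases hr : r < r0
            · exact hstreak r (by omega) (by omega)
            · have : r = r0 := by omega
              rwa [this])
          (fun s hs1 hs2 hs3 hs4 => by exfalso; omega)
        rw [show (15:Int) - (n:Int) - (v + 1) = r0 - v by omega] at this
        rw [this]
    · -- non-player cell: run resets to 0; A skips every start up to r0
      have hrun : (if pvCell board r0 c = player then v + 1 else 0) = 0 := if_neg hp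
      have hB : pvBRow board player length c v (r0 :: PySem.List.pyRange (r0 + 1) 15 1) =
          pvBRow board player length c 0 (PySem.List.pyRange (r0 + 1) 15 1) := by
        simp only [pvBRow, hrun]
        rw [if_neg (by omega)]
      rw [hB, hrest]
      have := ih 0 (by omega) le_rfl (by omega)
        (fun r h1 h2 => by exfalso; omega)
        (fun s hs1 hs2 hs3 hs4 => by exfalso; omega)
      rw [this]
      have hskip := pvSkip board player length c (v + 1).toNat (15 - ((n : Int) + 1) - v)
        (fun s hs1 hs2 hs3 => by
          by_cases hso : s ≤ 15 - ((n : Int) + 1) - length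
          · refine Or.inr ⟨(hfacts s (by omega) (by omega) (by omega) hs3).1, ?_⟩
            rintro ⟨h0, he⟩
            exact (hfacts s (by omega) (by omega) (by omega) hs3).2 (by omega) he
          · exact Or.inl (pvThreat_false board player c s length r0 (by omega) (by omega) hp))
      rw [hskip, show 15 - ((n : Int) + 1) - v + (((v + 1).toNat : Int)) = 15 - (n : Int) - 0 by omega]

lemma pvColEq (board : List (List String)) (player : String) (c length : Int) (hlen : 1 ≤ length) :
    pvScan player length (pvColOf board c) c 0 0 (pvColOf board c) =
    pvARow board player length c (PySem.List.pyRange 0 (15 - length) 1) := by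
  have hb := pvScan_eq_pvBRow board player c length hlen 15 (by norm_num) 0
  have ha := pvMain board player c length hlen 15 0 (by norm_num) le_rfl (by norm_num)
    (fun r h1 h2 => by exfalso; omega)
    (fun s hs1 hs2 hs3 hs4 => by exfalso; omega)
  norm_num at hb ha
  have hcol : pvColOf board c = (PySem.List.pyRange 0 15 1).map (fun r => pvCell board r c) := by
    simp [pvColOf, pvCell]
  rw [hcol] at hb ⊢
  rw [hb, ha]

lemma pvColList (board : List (List String)) (player : String) (length : Int) (hlen : 1 ≤ length) :
    ∀ cs : List Int, pvCols board player length cs = pvACol board player length cs := by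
  intro cs
  induction cs with
  | nil => rfl
  | cons c cs ih =>
    simp only [pvCols, pvACol, pvColEq board player c length hlen, ih]

lemma pvACol_none (board : List (List String)) (player : String) (length : Int)
    (h : 15 - length ≤ 0) : ∀ cs : List Int, pvACol board player length cs = none := by
  intro cs
  induction cs with
  | nil => rfl
  | cons c cs ih =>
    simp only [pvACol, PySem.List.pyRange_one_eq_nil h, pvARow, ih]

-- ===== VERDICT (by name: the statement is the Claim_ definition above) =====
theorem find_potential_vertical_move_spec : Claim_equal_find_potential_vertical_move := by
  intro board player length _ hpre
  unfold Spec_find_potential_vertical_move find_potential_vertical_move find_potential_vertical_move_alt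
  by_cases hbig : 15 - 1 < length
  · rw [if_pos hbig, pvACol_none board player length (by omega)]
  · rw [if_neg hbig, pvColList board player length hpre.1]
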